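-- pv_equiv track=rewrite | github.com/EvanSilva/Frankenstains-Workshop | Workshop/ListasYListas.py | total_enrollment
-- ===== SOURCE A (Python) =====
-- def total_enrollment(universidades):
--
--     students = []
--     fees = []
--
--     for universidad in universidades:
--         students.append(universidad[1])
--         fees.append(universidad[2] * universidad[1])
--
--
--     total_students = sum(students)
--     total_fees = sum(fees)
--     return total_students, total_fees
-- ===== SOURCE B (Python) =====
-- def total_enrollment(universidades):
--     def go(xs):
--         if len(xs) <= 1:
--             if not xs:
--                 return 0, 0
--             _, n, fee = xs[0]
--             return n, fee * n
--         mid = len(xs) // 2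
--         s1, f1 = go(xs[:mid])
--         s2, f2 = go(xs[mid:])
--         return s1 + s2, f1 + f2
--     return go(universidades)
-- ===== Notes on version B (the rewrite author's own statement) =====
-- stated objective: alternative
-- what changed: Replaces the single append-to-two-lists-then-sum loop with a divide-and-conquer recursion that splits the list in half and combines (students, fees) subtotals by pairwise addition.
import Mathlib
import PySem

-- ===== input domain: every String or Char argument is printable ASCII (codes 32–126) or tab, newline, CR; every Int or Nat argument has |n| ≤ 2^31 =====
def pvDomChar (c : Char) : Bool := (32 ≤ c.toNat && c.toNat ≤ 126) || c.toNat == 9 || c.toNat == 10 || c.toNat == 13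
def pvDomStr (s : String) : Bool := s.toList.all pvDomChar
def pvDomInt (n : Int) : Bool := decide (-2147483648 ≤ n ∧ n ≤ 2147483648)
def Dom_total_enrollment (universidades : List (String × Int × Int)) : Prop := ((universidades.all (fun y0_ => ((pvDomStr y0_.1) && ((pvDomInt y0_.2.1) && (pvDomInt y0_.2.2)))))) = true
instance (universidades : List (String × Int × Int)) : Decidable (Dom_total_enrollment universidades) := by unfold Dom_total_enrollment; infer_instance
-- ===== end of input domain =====

-- B replaces A's append-to-two-lists-then-sum loop with a divide-and-conquer recursion
-- that splits the list in half and adds the (students, fees) subtotals pairwise (alternative).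


-- ===== PORT A =====
-- Loop appending to two lists, then sum each.
def total_enrollment (universidades : List (String × Int × Int)) : Int × Int :=
  let st := universidades.foldl
    (fun (acc : List Int × List Int) u =>
      (acc.1 ++ [u.2.1], acc.2 ++ [u.2.2 * u.2.1])) ([], [])
  let total_students := st.1.sum
  let total_fees := st.2.sum
  (total_students, total_fees)

-- ===== PORT B =====
-- Divide and conquer: split in half, combine subtotals by pairwise addition.
def total_enrollment_go (xs : List (String × Int × Int)) : Int × Int :=
  if _h : xs.length ≤ 1 then
    match xs with
    | [] => (0, 0)
    | u :: _ => (u.2.1, u.2.2 * u.2.1)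
  else
    let mid := xs.length / 2
    let p1 := total_enrollment_go (xs.take mid)
    let p2 := total_enrollment_go (xs.drop mid)
    (p1.1 + p2.1, p1.2 + p2.2)
termination_by xs.length
decreasing_by
  · simp only [List.length_take]; omega
  · simp only [List.length_drop]; omega

def total_enrollment_alt (universidades : List (String × Int × Int)) : Int × Int :=
  total_enrollment_go universidades

-- ===== PRECONDITION & SPEC =====
def Spec_total_enrollment (universidades : List (String × Int × Int)) (out : Int × Int) : Prop := out = total_enrollment_alt universidades
instance (universidades : List (String × Int × Int)) (out : Int × Int) : Decidable (Spec_total_enrollment universidades out) := by unfold Spec_total_enrollment; infer_instance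

-- ===== CLAIM =====
def Claim_equal_total_enrollment : Prop := ∀ (universidades : List (String × Int × Int)), Dom_total_enrollment universidades → Spec_total_enrollment universidades (total_enrollment universidades)

-- ===== LEMMAS AND PROOFS =====

-- A's accumulator equals the prefix lists already built.
lemma total_enrollment_foldl (universidades : List (String × Int × Int))
    (s f : List Int) :
    universidades.foldl
      (fun (acc : List Int × List Int) u =>
        (acc.1 ++ [u.2.1], acc.2 ++ [u.2.2 * u.2.1])) (s, f)
      = (s ++ universidades.map (fun u => u.2.1),
         f ++ universidades.map (fun u => u.2.2 * u.2.1)) := by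
  induction universidades generalizing s f with
  | nil => simp
  | cons u us ih => simp [List.foldl, ih]

-- B's divide-and-conquer computes the two mapped sums.
lemma total_enrollment_go_eq (xs : List (String × Int × Int)) :
    total_enrollment_go xs
      = ((xs.map (fun u => u.2.1)).sum, (xs.map (fun u => u.2.2 * u.2.1)).sum) := by
  fun_induction total_enrollment_go xs with
  | case1 => simp
  | case2 a b h1 h2 =>
    have hb : b = [] := by cases b with | nil => rfl | cons x xs => simp at h2
    subst hb; simp
  | case3 xs h mid p1 p2 ih1 ih2 =>
    show (p1.1 + p2.1, p1.2 + p2.2) = _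
    simp only [p1, p2, ih1, ih2]
    have hta : xs.take mid ++ xs.drop mid = xs := List.take_append_drop mid xs
    conv_rhs => rw [← hta]
    simp

-- ===== VERDICT =====
theorem total_enrollment_spec : Claim_equal_total_enrollment := by
  intro universidades _
  unfold Spec_total_enrollment total_enrollment total_enrollment_alt
  simp [total_enrollment_foldl, total_enrollment_go_eq]
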